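-- pv_equiv track=rewrite | github.com/kontac815/HPO_APP | backend/app/utils.py | dedupe_spans
-- ===== SOURCE A (Python) =====
-- def dedupe_spans(spans: list[tuple[int, int]]) -> list[tuple[int, int]]:
--     seen: set[tuple[int, int]] = set()
--     out: list[tuple[int, int]] = []
--     for start, end in spans:
--         key = (start, end)
--         if key in seen:
--             continue
--         seen.add(key)
--         out.append(key)
--     out.sort()
--     return out
-- ===== SOURCE B (Python) =====
-- def dedupe_spans(spans: list[tuple[int, int]]) -> list[tuple[int, int]]:
--     ordered = sorted((start, end) for start, end in spans)
--     result: list[tuple[int, int]] = []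
--     prev = None
--     for cur in ordered:
--         if cur != prev:
--             result.append(cur)
--             prev = cur
--     return result
-- ===== Notes on version B (the rewrite author's own statement) =====
-- stated objective: alternative
-- what changed: Instead of maintaining a 'seen' set and an output list during the scan and sorting afterwards, B sorts first and then removes duplicates in one linear pass by comparing each element with the previously emitted one (no set at all).
import Mathlib
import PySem

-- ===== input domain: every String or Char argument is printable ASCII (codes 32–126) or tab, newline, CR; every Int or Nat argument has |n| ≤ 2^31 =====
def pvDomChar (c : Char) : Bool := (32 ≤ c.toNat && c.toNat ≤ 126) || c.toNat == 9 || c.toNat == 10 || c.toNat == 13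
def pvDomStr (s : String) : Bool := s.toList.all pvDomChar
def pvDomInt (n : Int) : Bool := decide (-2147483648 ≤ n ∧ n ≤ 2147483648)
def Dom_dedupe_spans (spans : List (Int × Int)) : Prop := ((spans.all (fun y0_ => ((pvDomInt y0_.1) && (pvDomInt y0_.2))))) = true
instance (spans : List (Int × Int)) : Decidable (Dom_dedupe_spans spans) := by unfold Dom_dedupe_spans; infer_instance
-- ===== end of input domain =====

-- B changes the algorithm: sort first, then a single adjacent-duplicate pass with a `prev`
-- sentinel, instead of A's seen-set scan followed by a sort. Return values proved equal.

-- ===== PORT A =====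
def dedupe_spans (spans : List (Int × Int)) : List (Int × Int) :=
  -- seen = set(); out = []
  let r := spans.foldl
    (fun (st : PySem.Set (Int × Int) × List (Int × Int)) sp =>
      let key := (sp.1, sp.2)
      if PySem.Set.contains st.1 key then st               -- if key in seen: continue
      else (PySem.Set.add st.1 key, st.2 ++ [key]))        -- seen.add(key); out.append(key)
    (PySem.Set.empty, [])
  PySem.List.sorted2 r.2 (fun p => p.1) (fun p => p.2)     -- out.sort()

-- ===== PORT B =====
-- the adjacent-dedup loop: for cur in ordered: if cur != prev: result.append(cur); prev = cur
def dsGo (prev : Option (Int × Int)) : List (Int × Int) → List (Int × Int)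
  | [] => []
  | cur :: rest =>
      if some cur = prev then dsGo prev rest
      else cur :: dsGo (some cur) rest

def dedupe_spans_alt (spans : List (Int × Int)) : List (Int × Int) :=
  let ordered := PySem.List.sorted2 (spans.map (fun p => (p.1, p.2))) (fun p => p.1) (fun p => p.2)
  dsGo none ordered

-- ===== PRECONDITION & SPEC =====
def Spec_dedupe_spans (spans : List (Int × Int)) (out : List (Int × Int)) : Prop := out = dedupe_spans_alt spans
instance (spans : List (Int × Int)) (out : List (Int × Int)) : Decidable (Spec_dedupe_spans spans out) := by unfold Spec_dedupe_spans; infer_instance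

-- ===== CLAIM (what is proved, stated in full; the proofs are below) =====
def Claim_equal_dedupe_spans : Prop := ∀ (spans : List (Int × Int)), Dom_dedupe_spans spans → Spec_dedupe_spans spans (dedupe_spans spans)

-- ===== LEMMAS AND PROOFS =====

-- Python's default tuple sort is the lexicographic order, i.e. `sorted` with the `Lex` key.
lemma sorted2_eq_sorted_lex (xs : List (Int × Int)) :
    PySem.List.sorted2 xs (fun p => p.1) (fun p => p.2) =
    PySem.List.sorted xs (fun p => toLex p) := by
  have hb : (fun (a b : Int × Int) =>
        decide (a.1 < b.1) || (!decide (b.1 < a.1) && decide (a.2 < b.2))) =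
      (fun (a b : Int × Int) => decide (toLex a < toLex b)) := by
    funext a b
    by_cases h1 : a.1 < b.1 <;> by_cases h2 : b.1 < a.1 <;> by_cases h3 : a.2 < b.2 <;>
      simp [Prod.Lex.toLex_lt_toLex, h1, h2, h3] <;> omega
  show xs.foldl (fun acc x => PySem.List.insertBy (fun a b =>
        decide (a.1 < b.1) || (!decide (b.1 < a.1) && decide (a.2 < b.2))) x acc) []
    = xs.foldl (fun acc x => PySem.List.insertBy (fun a b =>
        decide (toLex a < toLex b)) x acc) []
  rw [hb]

-- A's loop keeps `seen` and `out` equal as lists, so `out` ends up as set(spans)'s element list.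
lemma a_loop_eq (l : List (Int × Int)) (s : PySem.Set (Int × Int)) :
    l.foldl
      (fun (st : PySem.Set (Int × Int) × List (Int × Int)) sp =>
        let key := (sp.1, sp.2)
        if PySem.Set.contains st.1 key then st
        else (PySem.Set.add st.1 key, st.2 ++ [key])) (s, s)
    = (l.foldl PySem.Set.add s, l.foldl PySem.Set.add s) := by
  induction l generalizing s with
  | nil => rfl
  | cons x t ih =>
      by_cases h : PySem.Set.contains s x
      · show List.foldl _ (if PySem.Set.contains s x then (s, s)
            else (PySem.Set.add s x, s ++ [x])) t = _
        rw [if_pos h, ih, List.foldl_cons,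
            show PySem.Set.add s x = s from by unfold PySem.Set.add; rw [if_pos h]]
      · show List.foldl _ (if PySem.Set.contains s x then (s, s)
            else (PySem.Set.add s x, s ++ [x])) t = _
        rw [if_neg h, List.foldl_cons,
            show PySem.Set.add s x = s ++ [x] from by unfold PySem.Set.add; rw [if_neg h]]
        exact ih (s ++ [x])

-- the adjacent-dedup pass on a ≤-sorted list: output is strictly increasing and keeps exactly
-- the elements (other than the pending `prev` one)
lemma dsGo_spec (l : List (Int × Int)) :
    ∀ (prev : Option (Int × Int)),
    l.Pairwise (fun a b => toLex a ≤ toLex b) →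
    (∀ p, prev = some p → ∀ x ∈ l, toLex p ≤ toLex x) →
    (dsGo prev l).Pairwise (fun a b => toLex a < toLex b) ∧
    (∀ x, x ∈ dsGo prev l ↔ x ∈ l ∧ some x ≠ prev) := by
  induction l with
  | nil => exact fun prev _ _ => ⟨List.Pairwise.nil, by simp [dsGo]⟩
  | cons x t ih =>
      intro prev hpw hprev
      obtain ⟨hx, ht⟩ := List.pairwise_cons.1 hpw
      by_cases hc : some x = prev
      · rw [dsGo, if_pos hc]
        obtain ⟨hp, hm⟩ := ih prev ht (by
          intro p hpeq y hy
          rw [← hc] at hpeq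
          cases Option.some.inj hpeq
          exact hx y hy)
        refine ⟨hp, fun y => ?_⟩
        rw [hm y]
        constructor
        · exact fun ⟨h1, h2⟩ => ⟨List.mem_cons_of_mem _ h1, h2⟩
        · rintro ⟨h1, h2⟩
          rcases List.mem_cons.1 h1 with h1 | h1
          · subst h1; exact absurd hc h2
          · exact ⟨h1, h2⟩
      · rw [dsGo, if_neg hc]
        obtain ⟨hp, hm⟩ := ih (some x) ht (by
          intro p hpeq y hy
          cases Option.some.inj hpeq
          exact hx y hy)
        have hlt : ∀ y ∈ dsGo (some x) t, toLex x < toLex y := by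
          intro y hy
          obtain ⟨hyt, hyne⟩ := (hm y).1 hy
          refine lt_of_le_of_ne (hx y hyt) fun he => ?_
          exact hyne (by rw [toLex_inj.1 he.symm])
        refine ⟨List.pairwise_cons.2 ⟨hlt, hp⟩, fun y => ?_⟩
        constructor
        · intro hy
          rcases List.mem_cons.1 hy with h1 | h1
          · subst h1; exact ⟨List.mem_cons_self .., hc⟩
          · obtain ⟨hyt, hyne⟩ := (hm y).1 h1
            refine ⟨List.mem_cons_of_mem _ hyt, fun he => ?_⟩
            have h2 : toLex y ≤ toLex x := hprev y he.symm x (List.mem_cons_self ..)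
            have h3 : toLex x ≤ toLex y := hx y hyt
            exact hyne (by rw [toLex_inj.1 (le_antisymm h3 h2)])
        · rintro ⟨h1, h2⟩
          rcases List.mem_cons.1 h1 with h1 | h1
          · subst h1; exact List.mem_cons_self ..
          · by_cases hyx : y = x
            · subst hyx; exact List.mem_cons_self ..
            · exact List.mem_cons_of_mem _ ((hm y).2 ⟨h1, by simpa using hyx⟩)

-- ===== VERDICT (by name: the statement is the Claim_ definition above) =====
theorem dedupe_spans_spec : Claim_equal_dedupe_spans := by
  intro spans _
  unfold Spec_dedupe_spans dedupe_spans dedupe_spans_alt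
  simp only [List.map_id_fun', id]
  rw [show (PySem.Set.empty : PySem.Set (Int × Int)) = [] from rfl] at *
  rw [a_loop_eq spans [], ← PySem.Set.ofList_eq_foldl,
      sorted2_eq_sorted_lex, sorted2_eq_sorted_lex]
  have hpw := PySem.List.sorted_pairwise spans (fun p : Int × Int => toLex p)
  obtain ⟨hlt, hmem⟩ := dsGo_spec (PySem.List.sorted spans (fun p => toLex p)) none hpw
    (by intro p hp; cases hp)
  refine PySem.List.sorted_eq_of_perm_of_pairwise_lt _ _ _ ?_ hlt
  refine (List.perm_ext_iff_of_nodup ?_ (PySem.Set.nodup_ofList spans)).2 ?_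
  · exact hlt.imp (fun {a b} h he => by subst he; exact lt_irrefl _ h)
  · intro a
    rw [hmem a, PySem.List.mem_sorted, PySem.Set.mem_ofList]
    simp
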